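-- pv_equiv track=rewrite | github.com/LLaMeaR/dfs-lab | python/dfs_basic.py | dfs_full
-- ===== SOURCE A (Python) =====
-- from typing import Dict, List, Optional
--
-- def dfs_full(graph: Dict[int, List[int]]) -> List[List[int]]:
--     """비연결 그래프의 각 연결요소 방문 순서 반환"""
--     visited, components = set(), []
--     for v in graph.keys():
--         if v not in visited:
--             comp = []
--             _dfs_comp(graph, v, visited, comp)
--             components.append(comp)
--     return components
--
-- def _dfs_comp(graph, v, visited, comp):
--     visited.add(v); comp.append(v)
--     for nxt in graph[v]:
--         if nxt not in visited:
--             _dfs_comp(graph, nxt, visited, comp)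
-- ===== SOURCE B (Python) =====
-- def dfs_full(graph):
--     """Iterative DFS with an explicit stack instead of recursion."""
--     visited, components = set(), []
--     for v in graph.keys():
--         if v not in visited:
--             comp, stack = [], [v]
--             while stack:
--                 u = stack.pop()
--                 if u in visited:
--                     continue
--                 visited.add(u)
--                 comp.append(u)
--                 for w in reversed(graph[u]):
--                     stack.append(w)
--             components.append(comp)
--     return components
-- ===== Notes on version B (the rewrite author's own statement) =====
-- stated objective: alternative
-- what changed: The recursive _dfs_comp helper is replaced by an iterative DFS with an explicit stack (pop, visited-check at pop time, push neighbours in reversed order), reproducing the same pre-order without recursion.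
import Mathlib
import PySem

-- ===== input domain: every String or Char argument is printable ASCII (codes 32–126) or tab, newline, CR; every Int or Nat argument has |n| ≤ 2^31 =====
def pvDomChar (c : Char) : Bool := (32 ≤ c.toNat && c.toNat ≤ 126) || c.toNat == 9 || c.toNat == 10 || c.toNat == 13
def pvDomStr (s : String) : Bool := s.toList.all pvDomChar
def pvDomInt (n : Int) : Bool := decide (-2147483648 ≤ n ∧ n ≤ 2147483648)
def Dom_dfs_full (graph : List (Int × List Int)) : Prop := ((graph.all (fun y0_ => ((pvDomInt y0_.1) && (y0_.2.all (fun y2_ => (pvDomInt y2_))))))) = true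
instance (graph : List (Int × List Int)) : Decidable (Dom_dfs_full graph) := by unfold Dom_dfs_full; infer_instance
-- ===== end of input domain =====

-- B replaces A's recursive helper by an iterative DFS over an explicit stack (same visit order); equivalence is about the return value.

-- ===== PORT A =====
-- the Python dict: keys in insertion order (deduplicated), lookup = last value
def pvKeys (graph : List (Int × List Int)) : List Int := (PySem.Dict.ofList graph).keys
-- graph[v]; v not a key is a KeyError, excluded by Pre_dfs_full (the default [] is never read there)
def pvAdj (graph : List (Int × List Int)) (v : Int) : List Int := (PySem.Dict.ofList graph).getD v []

-- termination measure of both DFS loops: keys not yet visited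
def pvUnvis (ks vis : List Int) : Nat := (ks.filter (fun k => decide (k ∉ vis))).length

theorem pvUnvis_le (ks vis vis' : List Int) (h : ∀ x ∈ vis, x ∈ vis') :
    pvUnvis ks vis' ≤ pvUnvis ks vis := by
  unfold pvUnvis
  refine List.Sublist.length_le (List.monotone_filter_right ks ?_)
  intro k hk
  simp only [decide_eq_true_eq] at *
  exact fun hx => hk (h k hx)

theorem pvUnvis_lt (ks vis vis' : List Int) (v : Int) (hks : v ∈ ks) (hv : v ∉ vis)
    (hv' : v ∈ vis') (h : ∀ x ∈ vis, x ∈ vis') : pvUnvis ks vis' < pvUnvis ks vis := by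
  have hsub : (ks.filter (fun k => decide (k ∉ vis'))).Sublist
      (ks.filter (fun k => decide (k ∉ vis))) := by
    refine List.monotone_filter_right ks ?_
    intro k hk
    simp only [decide_eq_true_eq] at *
    exact fun hx => hk (h k hx)
  rcases Nat.lt_or_ge (pvUnvis ks vis') (pvUnvis ks vis) with hlt | hge
  · exact hlt
  · exfalso
    have heq : ks.filter (fun k => decide (k ∉ vis')) = ks.filter (fun k => decide (k ∉ vis)) :=
      hsub.eq_of_length (Nat.le_antisymm (pvUnvis_le ks vis vis' h) hge)
    have hmem : v ∈ ks.filter (fun k => decide (k ∉ vis)) := by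
      simp [List.mem_filter, hks, hv]
    rw [← heq] at hmem
    simp [List.mem_filter] at hmem
    exact hmem.2 hv'

theorem pvAdj_of_not_key (graph : List (Int × List Int)) (v : Int) (h : v ∉ pvKeys graph) :
    pvAdj graph v = [] := by
  unfold pvAdj pvKeys at *
  refine PySem.Dict.getD_of_not_contains _ _ ?_
  rw [PySem.Dict.contains_eq_decide_mem_keys]
  simpa using h

-- _dfs_comp's neighbour loop: for each pending node, skip if visited, else visit it
-- (mark + append) and recurse into its adjacency list, then continue with the siblings.
-- Returns (visited, comp) together with a proof that visited only grows (needed for termination).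
def pvDfsA (graph : List (Int × List Int)) :
    (ps : List Int) → (vis : List Int) → (comp : List Int) →
    {r : List Int × List Int // ∀ x ∈ vis, x ∈ r.1}
  | [], vis, comp => ⟨(vis, comp), fun _ hx => hx⟩
  | v :: vs, vis, comp =>
    if hv : v ∈ vis then
      let r := pvDfsA graph vs vis comp
      ⟨r.1, r.2⟩
    else
      let r1 := pvDfsA graph (pvAdj graph v) (PySem.Set.add vis v) (comp ++ [v])
      let r2 := pvDfsA graph vs r1.1.1 r1.1.2
      ⟨r2.1, fun x hx => r2.2 x (r1.2 x (by simp [PySem.Set.mem_add, hx]))⟩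
  termination_by ps vis _ => (pvUnvis (pvKeys graph) vis, ps.length)
  decreasing_by
  · exact Prod.Lex.right _ (Nat.lt_succ_self _)
  · by_cases hk : v ∈ pvKeys graph
    · exact Prod.Lex.left _ _ (pvUnvis_lt _ _ _ v hk hv (by simp [PySem.Set.mem_add])
        (fun x hx => by simp [PySem.Set.mem_add, hx]))
    · have hle : pvUnvis (pvKeys graph) (PySem.Set.add vis v) ≤ pvUnvis (pvKeys graph) vis :=
        pvUnvis_le _ _ _ (fun x hx => by simp [PySem.Set.mem_add, hx])
      rcases Nat.lt_or_ge (pvUnvis (pvKeys graph) (PySem.Set.add vis v)) (pvUnvis (pvKeys graph) vis) with hlt | hge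
      · exact Prod.Lex.left _ _ hlt
      · have : pvUnvis (pvKeys graph) (PySem.Set.add vis v) = pvUnvis (pvKeys graph) vis :=
          Nat.le_antisymm hle hge
        rw [this]
        refine Prod.Lex.right _ ?_
        simp [pvAdj_of_not_key graph v hk]
  · by_cases hk : v ∈ pvKeys graph
    · exact Prod.Lex.left _ _ (pvUnvis_lt _ _ _ v hk hv
        (r1.2 v (by simp [PySem.Set.mem_add]))
        (fun x hx => r1.2 x (by simp [PySem.Set.mem_add, hx])))
    · have hle : pvUnvis (pvKeys graph) r1.1.1 ≤ pvUnvis (pvKeys graph) vis :=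
        pvUnvis_le _ _ _ (fun x hx => r1.2 x (by simp [PySem.Set.mem_add, hx]))
      rcases Nat.lt_or_ge (pvUnvis (pvKeys graph) r1.1.1) (pvUnvis (pvKeys graph) vis) with hlt | hge
      · exact Prod.Lex.left _ _ hlt
      · have : pvUnvis (pvKeys graph) r1.1.1 = pvUnvis (pvKeys graph) vis :=
          Nat.le_antisymm hle hge
        rw [this]
        exact Prod.Lex.right _ (Nat.lt_succ_self _)

-- _dfs_comp(graph, v, visited, comp): visited.add(v); comp.append(v); loop over graph[v]
def pvDfsCompA (graph : List (Int × List Int)) (v : Int) (vis comp : List Int) :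
    List Int × List Int :=
  (pvDfsA graph (pvAdj graph v) (PySem.Set.add vis v) (comp ++ [v])).1

def dfs_full (graph : List (Int × List Int)) : List (List Int) :=
  -- visited, components = set(), []; for v in graph.keys(): ...
  ((pvKeys graph).foldl
    (fun (st : List Int × List (List Int)) v =>
      if v ∈ st.1 then st
      else
        let r := pvDfsCompA graph v st.1 []
        (r.1, st.2 ++ [r.2]))
    (PySem.Set.empty, [])).2

-- ===== PORT B =====
-- iterative DFS: while stack: u = stack.pop(); skip if visited, else visit and push
-- reversed(graph[u]).  The Lean stack has its top at the HEAD (Python pushes/pops at the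
-- end); 'for w in reversed(graph[u]): stack.append(w)' is the foldl of push over the reversed list.
def pvDfsB (graph : List (Int × List Int)) :
    (stack : List Int) → (vis : List Int) → (comp : List Int) → List Int × List Int
  | [], vis, comp => (vis, comp)
  | u :: st, vis, comp =>
    if u ∈ vis then pvDfsB graph st vis comp
    else pvDfsB graph ((pvAdj graph u).reverse.foldl (fun s w => w :: s) st)
           (PySem.Set.add vis u) (comp ++ [u])
  termination_by stack vis _ => (pvUnvis (pvKeys graph) vis, stack.length)
  decreasing_by
  · exact Prod.Lex.right _ (Nat.lt_succ_self _)
  · rename_i hu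
    by_cases hk : u ∈ pvKeys graph
    · exact Prod.Lex.left _ _ (pvUnvis_lt _ _ _ u hk hu (by simp [PySem.Set.mem_add])
        (fun x hx => by simp [PySem.Set.mem_add, hx]))
    · have hle : pvUnvis (pvKeys graph) (PySem.Set.add vis u) ≤ pvUnvis (pvKeys graph) vis :=
        pvUnvis_le _ _ _ (fun x hx => by simp [PySem.Set.mem_add, hx])
      rcases Nat.lt_or_ge (pvUnvis (pvKeys graph) (PySem.Set.add vis u)) (pvUnvis (pvKeys graph) vis) with hlt | hge
      · exact Prod.Lex.left _ _ hlt
      · have heq : pvUnvis (pvKeys graph) (PySem.Set.add vis u) = pvUnvis (pvKeys graph) vis :=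
          Nat.le_antisymm hle hge
        rw [heq]
        refine Prod.Lex.right _ ?_
        simp [pvAdj_of_not_key graph u hk]

def dfs_full_alt (graph : List (Int × List Int)) : List (List Int) :=
  ((pvKeys graph).foldl
    (fun (st : List Int × List (List Int)) v =>
      if v ∈ st.1 then st
      else
        let r := pvDfsB graph [v] st.1 []
        (r.1, st.2 ++ [r.2]))
    (PySem.Set.empty, [])).2

-- ===== PRECONDITION & SPEC =====
-- Pre_ excludes exactly the graphs on which the Python A raises KeyError: a neighbour of
-- some key that is not itself a key (every key is visited, so every such neighbour is reached).
def Pre_dfs_full (graph : List (Int × List Int)) : Prop :=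
  ∀ v ∈ pvKeys graph, ∀ n ∈ pvAdj graph v, n ∈ pvKeys graph
instance (graph : List (Int × List Int)) : Decidable (Pre_dfs_full graph) := by
  unfold Pre_dfs_full; infer_instance

def pvWitness_dfs_full : (List (Int × List Int)) := [(1, [2]), (2, [1]), (3, [])]

def Spec_dfs_full (graph : List (Int × List Int)) (out : List (List Int)) : Prop := out = dfs_full_alt graph
instance (graph : List (Int × List Int)) (out : List (List Int)) : Decidable (Spec_dfs_full graph out) := by unfold Spec_dfs_full; infer_instance

-- ===== CLAIM (what is proved, stated in full; the proofs are below) =====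
def Claim_equal_dfs_full : Prop := ∀ (graph : List (Int × List Int)), Dom_dfs_full graph → Pre_dfs_full graph → Spec_dfs_full graph (dfs_full graph)

-- ===== LEMMAS AND PROOFS =====

theorem pvPush (l st : List Int) : l.foldl (fun s w => w :: s) st = l.reverse ++ st := by
  induction l generalizing st with
  | nil => rfl
  | cons x xs ih => simp [List.foldl_cons, ih, List.append_assoc]

-- the key lemma: running the stack machine on ps ++ s is running A's recursive DFS on the
-- pending list ps, then the stack machine on the rest of the stack
theorem pvDfsA_nil (graph : List (Int × List Int)) (vis comp : List Int) :
    (pvDfsA graph [] vis comp).1 = (vis, comp) := by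
  simp [pvDfsA]

theorem pvDfsA_cons_not_mem (graph : List (Int × List Int)) (v : Int) (vs vis comp : List Int)
    (hv : v ∉ vis) :
    (pvDfsA graph (v :: vs) vis comp).1 =
      (pvDfsA graph vs (pvDfsA graph (pvAdj graph v) (PySem.Set.add vis v) (comp ++ [v])).1.1
        (pvDfsA graph (pvAdj graph v) (PySem.Set.add vis v) (comp ++ [v])).1.2).1 := by
  simp [pvDfsA, hv]

-- the key lemma: running the stack machine on ps ++ s is running A's recursive DFS on the
-- pending list ps, then the stack machine on the rest of the stack
theorem pvDfsB_append (graph : List (Int × List Int)) (ps s vis comp : List Int) :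
    pvDfsB graph (ps ++ s) vis comp =
      pvDfsB graph s (pvDfsA graph ps vis comp).1.1 (pvDfsA graph ps vis comp).1.2 := by
  induction ps, vis, comp using pvDfsA.induct (graph := graph) generalizing s with
  | case1 vis comp => simp [pvDfsA]
  | case2 v vs vis comp hv ih =>
    rw [List.cons_append]
    rw [show pvDfsB graph (v :: (vs ++ s)) vis comp = pvDfsB graph (vs ++ s) vis comp by
      simp [pvDfsB, hv]]
    rw [ih, show pvDfsA graph (v :: vs) vis comp = pvDfsA graph vs vis comp by
      simp [pvDfsA, hv]]
  | case3 v vs vis comp hv r1 ih1 ih2 ih3 =>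
    rw [List.cons_append]
    rw [show pvDfsB graph (v :: (vs ++ s)) vis comp =
        pvDfsB graph ((pvAdj graph v).reverse.foldl (fun s w => w :: s) (vs ++ s))
          (PySem.Set.add vis v) (comp ++ [v]) by
      simp [pvDfsB, hv]]
    rw [pvPush, List.reverse_reverse, ih1, ih3, pvDfsA_cons_not_mem graph v vs vis comp hv]

theorem pvDfsB_single (graph : List (Int × List Int)) (v : Int) (vis comp : List Int)
    (hv : v ∉ vis) :
    pvDfsB graph [v] vis comp = pvDfsCompA graph v vis comp := by
  rw [show ([v] : List Int) = [v] ++ [] by simp, pvDfsB_append,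
    pvDfsA_cons_not_mem graph v [] vis comp hv, pvDfsA_nil]
  simp [pvDfsB, pvDfsCompA]

-- ===== VERDICT (by name: the statement is the Claim_ definition above) =====
theorem dfs_full_spec : Claim_equal_dfs_full := by
  intro graph _ _
  unfold Spec_dfs_full dfs_full dfs_full_alt
  have hstep : (fun (st : List Int × List (List Int)) v =>
      if v ∈ st.1 then st else
        let r := pvDfsCompA graph v st.1 []
        (r.1, st.2 ++ [r.2])) =
      (fun (st : List Int × List (List Int)) v =>
      if v ∈ st.1 then st else
        let r := pvDfsB graph [v] st.1 []
        (r.1, st.2 ++ [r.2])) := by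
    funext st v
    by_cases hv : v ∈ st.1
    · simp [hv]
    · simp only [hv, pvDfsB_single graph v st.1 [] hv]
  rw [hstep]
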